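-- pv_equiv track=rewrite | github.com/ianmmc/learning-connection-time | infrastructure/utilities/school_discovery.py | get_representative_sample
-- ===== SOURCE A (Python) =====
-- from typing import List, Dict, Optional, Tuple
--
-- def filter_schools_by_level(schools: List[Dict], level: str) -> List[Dict]:
--     """
--     Filter schools by grade level
--
--     Args:
--         schools: List of school dictionaries
--         level: 'elementary', 'middle', or 'high'
--
--     Returns:
--         Filtered list of schools
--     """
--     return [s for s in schools if s.get('level') == level]
--
-- def get_representative_sample(schools: List[Dict]) -> List[Dict]:
--     """
--     Get representative sample of schools (1 per level)
--
--     Args: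
--         schools: List of school dictionaries
--
--     Returns:
--         Representative sample (up to 3 schools, 1 per level)
--
--     Example:
--         >>> all_schools = discover_school_sites_simple('district.org')
--         >>> sample = get_representative_sample(all_schools)
--         >>> len(sample)  # 1-3 schools
--         3
--     """
--     sample = []
--
--     # Get one of each level
--     for level in ['elementary', 'middle', 'high']:
--         level_schools = filter_schools_by_level(schools, level)
--         if level_schools:
--             sample.append(level_schools[0])
--
--     # If no levels determined, return up to 3 schools
--     if not sample and schools:
--         sample = schools[:3]
--
--     return sample
-- ===== SOURCE B (Python) =====
-- def get_representative_sample(schools):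
--     # One pass with three first-occurrence slots instead of three filter passes (same result).
--     elem = mid = high = None
--     for s in schools:
--         lvl = s.get('level')
--         if lvl == 'elementary':
--             if elem is None:
--                 elem = s
--         elif lvl == 'middle':
--             if mid is None:
--                 mid = s
--         elif lvl == 'high':
--             if high is None:
--                 high = s
--     sample = [s for s in (elem, mid, high) if s is not None]
--     if not sample and schools:
--         sample = schools[:3]
--     return sample
-- ===== Notes on version B (the rewrite author's own statement) =====
-- stated objective: alternative
-- what changed: Replaces three separate filter passes over the school list with a single pass keeping one first-occurrence slot per level, then emits the slots in the fixed elementary/middle/high order.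
import Mathlib
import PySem

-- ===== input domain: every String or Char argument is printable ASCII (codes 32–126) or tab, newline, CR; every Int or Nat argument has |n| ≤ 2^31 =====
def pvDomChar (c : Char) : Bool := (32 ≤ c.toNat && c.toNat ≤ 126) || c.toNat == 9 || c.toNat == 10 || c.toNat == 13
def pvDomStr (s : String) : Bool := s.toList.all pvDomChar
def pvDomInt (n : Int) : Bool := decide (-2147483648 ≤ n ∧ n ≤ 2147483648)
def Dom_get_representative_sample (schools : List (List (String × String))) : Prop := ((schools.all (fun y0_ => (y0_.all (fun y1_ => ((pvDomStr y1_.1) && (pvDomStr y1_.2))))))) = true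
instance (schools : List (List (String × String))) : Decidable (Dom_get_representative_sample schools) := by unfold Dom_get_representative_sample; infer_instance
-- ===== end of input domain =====

-- B replaces A's three filter passes by one pass with a first-occurrence slot per level (alternative decomposition; same return value).

-- ===== PORT A =====
def filter_schools_by_level (schools : List (List (String × String))) (level : String) : List (List (String × String)) :=
  schools.filter (fun s => (PySem.Dict.mk s).get? "level" == some level)

def get_representative_sample (schools : List (List (String × String))) : List (List (String × String)) :=
  let sample : List (List (String × String)) :=
    ["elementary", "middle", "high"].foldl (fun sample level =>
      let level_schools := filter_schools_by_level schools level
      match level_schools with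
      | [] => sample
      | s :: _ => sample ++ [s]) []
  if sample = [] ∧ schools ≠ [] then PySem.List.slice schools none (some 3) else sample

-- ===== PORT B =====
def get_representative_sample_alt (schools : List (List (String × String))) : List (List (String × String)) :=
  let st := schools.foldl
    (fun (st : Option (List (String × String)) × Option (List (String × String)) × Option (List (String × String))) s =>
      let lvl := (PySem.Dict.mk s).get? "level"
      if lvl = some "elementary" then (if st.1 = none then (some s, st.2.1, st.2.2) else st)
      else if lvl = some "middle" then (if st.2.1 = none then (st.1, some s, st.2.2) else st)
      else if lvl = some "high" then (if st.2.2 = none then (st.1, st.2.1, some s) else st)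
      else st)
    (none, none, none)
  let sample := ([st.1, st.2.1, st.2.2].filterMap id)
  if sample = [] ∧ schools ≠ [] then PySem.List.slice schools none (some 3) else sample

-- ===== PRECONDITION & SPEC =====
def Spec_get_representative_sample (schools : List (List (String × String))) (out : List (List (String × String))) : Prop := out = get_representative_sample_alt schools
instance (schools : List (List (String × String))) (out : List (List (String × String))) : Decidable (Spec_get_representative_sample schools out) := by unfold Spec_get_representative_sample; infer_instance

-- ===== CLAIM (what is proved, stated in full; the proofs are below) =====
def Claim_equal_get_representative_sample : Prop := ∀ (schools : List (List (String × String))), Dom_get_representative_sample schools → Spec_get_representative_sample schools (get_representative_sample schools)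

-- ===== LEMMAS AND PROOFS =====

-- the per-element update B applies to one slot, and B's whole step
def pvUpd (lvl : String) (s : List (String × String)) (a : Option (List (String × String))) : Option (List (String × String)) :=
  if (PySem.Dict.mk s).get? "level" = some lvl then (if a = none then some s else a) else a

def pvStep (st : Option (List (String × String)) × Option (List (String × String)) × Option (List (String × String)))
    (s : List (String × String)) :
    Option (List (String × String)) × Option (List (String × String)) × Option (List (String × String)) :=
  let lvl := (PySem.Dict.mk s).get? "level"
  if lvl = some "elementary" then (if st.1 = none then (some s, st.2.1, st.2.2) else st)
  else if lvl = some "middle" then (if st.2.1 = none then (st.1, some s, st.2.2) else st)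
  else if lvl = some "high" then (if st.2.2 = none then (st.1, st.2.1, some s) else st)
  else st

theorem step_eq (st : Option (List (String × String)) × Option (List (String × String)) × Option (List (String × String)))
    (s : List (String × String)) :
    pvStep st s = (pvUpd "elementary" s st.1, pvUpd "middle" s st.2.1, pvUpd "high" s st.2.2) := by
  obtain ⟨a, b, c⟩ := st
  unfold pvStep pvUpd
  by_cases he : (PySem.Dict.mk s).get? "level" = some "elementary"
  · have hm : ¬ (PySem.Dict.mk s).get? "level" = some "middle" := by simp [he]
    have hh : ¬ (PySem.Dict.mk s).get? "level" = some "high" := by simp [he]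
    by_cases ha : a = none <;> simp [he, ha]
  · by_cases hm : (PySem.Dict.mk s).get? "level" = some "middle"
    · have hh : ¬ (PySem.Dict.mk s).get? "level" = some "high" := by simp [hm]
      by_cases hb : b = none <;> simp [hm, hb]
    · by_cases hh : (PySem.Dict.mk s).get? "level" = some "high"
      · by_cases hc : c = none <;> simp [hh, hc]
      · simp [he, hm, hh]

theorem fold_upd_some (lvl : String) (y : List (String × String)) (xs : List (List (String × String))) :
    xs.foldl (fun a s => pvUpd lvl s a) (some y) = some y := by
  induction xs with
  | nil => rfl
  | cons x xs ih =>
    rw [List.foldl_cons]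
    have h1 : pvUpd lvl x (some y) = some y := by unfold pvUpd; split <;> simp
    rw [h1]; exact ih

theorem fold_upd_none (lvl : String) (xs : List (List (String × String))) :
    xs.foldl (fun a s => pvUpd lvl s a) none
      = xs.find? (fun s => (PySem.Dict.mk s).get? "level" == some lvl) := by
  induction xs with
  | nil => rfl
  | cons x xs ih =>
    simp only [List.foldl_cons]
    by_cases h : (PySem.Dict.mk x).get? "level" = some lvl
    · rw [List.find?_cons_of_pos (by simpa using h)]
      simpa only [pvUpd, if_pos h, if_pos rfl] using fold_upd_some lvl x xs
    · rw [List.find?_cons_of_neg (by simpa using h)]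
      simpa only [pvUpd, if_neg h] using ih

-- B's triple fold splits into three independent slot folds
theorem trip_fold (schools : List (List (String × String)))
    (a b c : Option (List (String × String))) :
    schools.foldl pvStep (a, b, c)
    = (schools.foldl (fun a s => pvUpd "elementary" s a) a,
       schools.foldl (fun a s => pvUpd "middle" s a) b,
       schools.foldl (fun a s => pvUpd "high" s a) c) := by
  induction schools generalizing a b c with
  | nil => rfl
  | cons s rest ih =>
    simp only [List.foldl_cons, step_eq]
    exact ih _ _ _

-- head of the A-side filter is find?
theorem match_filter (schools : List (List (String × String))) (level : String)
    (acc : List (List (String × String))) :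
    (match filter_schools_by_level schools level with
      | [] => acc
      | s :: _ => acc ++ [s])
    = acc ++ ((schools.find? (fun s => (PySem.Dict.mk s).get? "level" == some level)).toList) := by
  unfold filter_schools_by_level
  induction schools with
  | nil => simp
  | cons s rest ih =>
    by_cases h : ((PySem.Dict.mk s).get? "level" == some level) = true
    · simp [List.find?, h]
    · simpa [List.find?, h] using ih

theorem samples_eq (schools : List (List (String × String))) :
    (["elementary", "middle", "high"].foldl (fun sample level =>
      match filter_schools_by_level schools level with
      | [] => sample
      | s :: _ => sample ++ [s]) [])
    = ([(schools.find? (fun s => (PySem.Dict.mk s).get? "level" == some "elementary")),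
        (schools.find? (fun s => (PySem.Dict.mk s).get? "level" == some "middle")),
        (schools.find? (fun s => (PySem.Dict.mk s).get? "level" == some "high"))].filterMap id) := by
  simp only [List.foldl_cons, List.foldl_nil, match_filter]
  cases schools.find? (fun s => (PySem.Dict.mk s).get? "level" == some "elementary") <;>
  cases schools.find? (fun s => (PySem.Dict.mk s).get? "level" == some "middle") <;>
  cases schools.find? (fun s => (PySem.Dict.mk s).get? "level" == some "high") <;> simp

-- ===== VERDICT (by name: the statement is the Claim_ definition above) =====
theorem get_representative_sample_spec : Claim_equal_get_representative_sample := by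
  intro schools _
  show get_representative_sample schools = get_representative_sample_alt schools
  unfold get_representative_sample get_representative_sample_alt
  rw [show (fun (st : Option (List (String × String)) × Option (List (String × String)) × Option (List (String × String))) s =>
      let lvl := (PySem.Dict.mk s).get? "level"
      if lvl = some "elementary" then (if st.1 = none then (some s, st.2.1, st.2.2) else st)
      else if lvl = some "middle" then (if st.2.1 = none then (st.1, some s, st.2.2) else st)
      else if lvl = some "high" then (if st.2.2 = none then (st.1, st.2.1, some s) else st)
      else st) = pvStep from rfl, trip_fold, fold_upd_none, fold_upd_none, fold_upd_none, samples_eq]
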